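-- pv_equiv track=rewrite | github.com/arun-gupta/genai-labs | backend/app/services/generation_analytics_service.py | _estimate_syllables
-- ===== SOURCE A (Python) =====
-- def _estimate_syllables(text: str) -> int:
--     """Estimate syllable count."""
--     # Simple estimation: count vowels and some consonant combinations
--     vowels = 'aeiouy'
--     syllable_count = 0
--     text_lower = text.lower()
--
--     for i, char in enumerate(text_lower):
--         if char in vowels:
--             if i == 0 or text_lower[i-1] not in vowels:
--                 syllable_count += 1
--
--     return syllable_count
-- ===== SOURCE B (Python) =====
-- import re
--
-- def _estimate_syllables(text: str) -> int:
--     """Estimate syllable count."""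
--     return len(re.findall(r'[aeiouy]+', text.lower()))
-- ===== Notes on version B (the rewrite author's own statement) =====
-- stated objective: idiomatic
-- what changed: Replaces the explicit index loop with previous-character comparison by a single regex findall of maximal vowel runs, counting the matches.
import Mathlib
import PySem

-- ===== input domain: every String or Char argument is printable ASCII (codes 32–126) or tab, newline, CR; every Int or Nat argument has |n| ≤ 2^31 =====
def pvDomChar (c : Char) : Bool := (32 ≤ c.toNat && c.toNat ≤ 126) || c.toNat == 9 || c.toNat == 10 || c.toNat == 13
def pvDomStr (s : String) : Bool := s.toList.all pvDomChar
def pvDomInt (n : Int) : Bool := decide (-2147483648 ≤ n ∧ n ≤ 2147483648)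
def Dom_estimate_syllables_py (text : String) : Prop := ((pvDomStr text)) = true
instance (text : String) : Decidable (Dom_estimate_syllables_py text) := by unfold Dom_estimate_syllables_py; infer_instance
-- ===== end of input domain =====

-- B replaces A's index loop with previous-character check by counting maximal vowel runs (regex findall); idiomatic, same cost.

-- ===== PORT A =====
-- vowels = 'aeiouy'
def pvVowelsA : List Char := ['a', 'e', 'i', 'o', 'u', 'y']

-- literal port: enumerate over text.lower(); text_lower[i-1] is only consulted when i ≠ 0
-- (Python's `or` short-circuits), so pyGetD with a dummy default is exact there.
def estimate_syllables_py (text : String) : Int :=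
  let text_lower := (PySem.Str.lower text).toList
  (PySem.List.enumerate text_lower 0).foldl
    (fun syllable_count p =>
      if p.2 ∈ pvVowelsA then
        if p.1 == 0 || !(decide (PySem.List.pyGetD text_lower (p.1 - 1) ' ' ∈ pvVowelsA)) then
          syllable_count + 1
        else syllable_count
      else syllable_count)
    0

-- ===== PORT B =====
def pvIsVowelB (c : Char) : Bool := decide (c ∈ ['a', 'e', 'i', 'o', 'u', 'y'])

-- each regex match of [aeiouy]+ is a maximal vowel run: on seeing a vowel, count 1 and skip the run
def pvCountRuns : List Char → Int
  | [] => 0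
  | c :: rest =>
    if pvIsVowelB c then 1 + pvCountRuns (rest.dropWhile pvIsVowelB) else pvCountRuns rest
  termination_by l => l.length
  decreasing_by
  · exact Nat.lt_succ_of_le (List.length_dropWhile_le _ _)
  · simp

def estimate_syllables_py_alt (text : String) : Int :=
  pvCountRuns (PySem.Str.lower text).toList

-- ===== PRECONDITION & SPEC =====
def Spec_estimate_syllables_py (text : String) (out : Int) : Prop := out = estimate_syllables_py_alt text
instance (text : String) (out : Int) : Decidable (Spec_estimate_syllables_py text out) := by unfold Spec_estimate_syllables_py; infer_instance

-- ===== CLAIM (what is proved, stated in full; the proofs are below) =====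
def Claim_equal_estimate_syllables_py : Prop := ∀ (text : String), Dom_estimate_syllables_py text → Spec_estimate_syllables_py text (estimate_syllables_py text)

-- ===== LEMMAS AND PROOFS =====

-- A's loop, as a recursion carrying the "previous char was a vowel" flag
def pvCountA (prev : Bool) : List Char → Int
  | [] => 0
  | c :: rest =>
    (if pvIsVowelB c && !prev then 1 else 0) + pvCountA (pvIsVowelB c) rest

-- the flag A consults at position k of L
def pvPrevV (L : List Char) (k : Nat) : Bool :=
  if k = 0 then false else pvIsVowelB (L.getD (k - 1) ' ')

lemma pvMemVowels_iff (c : Char) : (c ∈ pvVowelsA) ↔ pvIsVowelB c = true := by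
  simp [pvVowelsA, pvIsVowelB]

lemma pvFoldA (L : List Char) :
    ∀ (rest : List Char) (k : Nat) (acc : Int), L.drop k = rest →
    (PySem.List.enumerate rest (k : Int)).foldl
      (fun syllable_count p =>
        if p.2 ∈ pvVowelsA then
          if p.1 == 0 || !(decide (PySem.List.pyGetD L (p.1 - 1) ' ' ∈ pvVowelsA)) then
            syllable_count + 1
          else syllable_count
        else syllable_count) acc
      = acc + pvCountA (pvPrevV L k) rest := by
  intro rest
  induction rest with
  | nil => intro k acc _; simp [PySem.List.enumerate, pvCountA]
  | cons c r ih =>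
    intro k acc hdrop
    have hLk : L[k]? = some c := by
      have h0 : (L.drop k)[0]? = L[k + 0]? := List.getElem?_drop
      rw [hdrop] at h0
      simpa using h0.symm
    have hnext : L.drop (k + 1) = r := by
      have h2 : List.drop 1 (List.drop k L) = r := by rw [hdrop]; simp
      rwa [List.drop_drop] at h2
    rw [PySem.List.enumerate_cons, List.foldl_cons]
    have hstep :
        (if ((k : Int), c).2 ∈ pvVowelsA then
          if (((k : Int), c).1 == 0
              || !(decide (PySem.List.pyGetD L (((k : Int), c).1 - 1) ' ' ∈ pvVowelsA))) = true then
            acc + 1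
          else acc
        else acc)
        = acc + (if pvIsVowelB c && !(pvPrevV L k) then 1 else 0) := by
      show
        (if c ∈ pvVowelsA then
          if ((k : Int) == 0
              || !(decide (PySem.List.pyGetD L ((k : Int) - 1) ' ' ∈ pvVowelsA))) = true then
            acc + 1
          else acc
        else acc)
        = acc + (if pvIsVowelB c && !(pvPrevV L k) then 1 else 0)
      by_cases hv : pvIsVowelB c = true
      · simp only [pvMemVowels_iff, hv, if_pos, Bool.true_and]
        rcases Nat.eq_zero_or_pos k with hk0 | hkpos
        · subst hk0
          simp [pvPrevV]
        · have hknz : ((k : Int) == 0) = false := by simp; omega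
          have hidx : (k : Int) - 1 = ((k - 1 : Nat) : Int) := by omega
          rw [hknz, hidx, Bool.false_or, PySem.List.pyGetD_natCast]
          cases hb : pvIsVowelB (L.getD (k - 1) ' ') with
          | false =>
            have hdec : decide (L.getD (k - 1) ' ' ∈ pvVowelsA) = false := by
              simpa [pvIsVowelB, pvVowelsA] using hb
            simp [hdec, pvPrevV, Nat.pos_iff_ne_zero.mp hkpos] <;>
              simpa [← List.getD_eq_getElem?_getD] using hb
          | true =>
            have hdec : decide (L.getD (k - 1) ' ' ∈ pvVowelsA) = true := by
              simpa [pvIsVowelB, pvVowelsA] using hb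
            simp [hdec, pvPrevV, Nat.pos_iff_ne_zero.mp hkpos] <;>
              simpa [← List.getD_eq_getElem?_getD] using hb
      · have hv' : pvIsVowelB c = false := by simpa using hv
        simp [pvMemVowels_iff, hv']
    rw [hstep]
    have hcast : (k : Int) + 1 = ((k + 1 : Nat) : Int) := by omega
    rw [hcast, ih (k + 1) _ hnext]
    have hpnext : pvPrevV L (k + 1) = pvIsVowelB c := by
      have hg : L.getD k ' ' = c := by simp [List.getD, hLk]
      unfold pvPrevV
      rw [if_neg (Nat.succ_ne_zero k), Nat.add_sub_cancel, hg]
    rw [hpnext]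
    simp [pvCountA]
    ring

lemma pvCountA_eq (l : List Char) :
    pvCountA false l = pvCountRuns l ∧
    pvCountA true l = pvCountRuns (l.dropWhile pvIsVowelB) := by
  induction l with
  | nil => simp [pvCountA, pvCountRuns]
  | cons c r ih =>
    by_cases hv : pvIsVowelB c = true
    · constructor
      · rw [pvCountA, pvCountRuns]
        simp [hv, ih.2]
      · rw [pvCountA, List.dropWhile_cons_of_pos hv]
        simp [hv, ih.2]
    · have hv' : pvIsVowelB c = false := by simpa using hv
      constructor
      · rw [pvCountA, pvCountRuns]
        simp [hv', ih.1]
      · rw [pvCountA, List.dropWhile_cons_of_neg (by simp [hv'])]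
        rw [pvCountRuns]
        simp [hv', ih.1]

-- ===== VERDICT (by name: the statement is the Claim_ definition above) =====
theorem estimate_syllables_py_spec : Claim_equal_estimate_syllables_py := by
  intro text _
  unfold Spec_estimate_syllables_py estimate_syllables_py estimate_syllables_py_alt
  have h := pvFoldA ((PySem.Str.lower text).toList) ((PySem.Str.lower text).toList) 0 0 (by simp)
  simp only [Nat.cast_zero] at h
  rw [h]
  simp [pvPrevV, (pvCountA_eq _).1]
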